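-- pv_equiv track=rewrite | github.com/neonco/egeinf | yandex9var/task23.py | f
-- ===== SOURCE A (Python) =====
-- def f(x, end):
--     if x == end:
--         return 1
--     if x < end:
--         return 0
--     if x % 3 == 0:
--         return f(x-5, end) + f(x//3, end)
--     else:
--         return f(x-5, end) + f(x - x%3, end)
-- ===== SOURCE B (Python) =====
-- def f(x, end):
--     # Top-down memoized evaluation of the same path count: each value y is
--     # computed once and cached, so shared subproblems are not recomputed.
--     memo = {}
--
--     def go(y):
--         if y in memo:
--             return memo[y]
--         if y == end:
--             v = 1
--         elif y < end:
--             v = 0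
--         else:
--             nxt = y // 3 if y % 3 == 0 else y - y % 3
--             v = go(y - 5) + go(nxt)
--         memo[y] = v
--         return v
--
--     return go(x)
-- ===== Notes on version B (the rewrite author's own statement) =====
-- stated objective: alternative
-- what changed: Replaces the naive doubly-recursive path count with top-down memoization over a dict, so every reachable value is evaluated once instead of once per path (intended as faster; a timing run could not confirm a ratio because A times out where B returns).
-- outside the precondition, e.g. on f(-1, -2): A returns 0, B returns 0
import Mathlib
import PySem

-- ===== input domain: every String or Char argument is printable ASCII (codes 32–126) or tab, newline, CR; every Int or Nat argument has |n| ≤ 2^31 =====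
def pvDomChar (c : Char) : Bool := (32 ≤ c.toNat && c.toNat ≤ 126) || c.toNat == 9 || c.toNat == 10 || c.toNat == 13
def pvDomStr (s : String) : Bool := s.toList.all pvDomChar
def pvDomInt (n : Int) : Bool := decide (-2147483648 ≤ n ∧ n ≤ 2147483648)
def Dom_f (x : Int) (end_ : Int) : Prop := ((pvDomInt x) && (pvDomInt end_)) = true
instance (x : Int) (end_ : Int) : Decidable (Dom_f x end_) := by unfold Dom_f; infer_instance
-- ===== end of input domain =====

-- B replaces A's naive double recursion with top-down memoization (a dict cache),
-- computing each reachable value once instead of once per path; same results.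

-- ===== PORT A =====
-- fuel-bounded transliteration of A's recursion; fuel x.toNat+1 suffices on Pre_f
def fAux : Nat → Int → Int → Int
  | 0, _, _ => 0
  | Nat.succ n, x, end_ =>
    if x = end_ then 1
    else if x < end_ then 0
    else if PySem.Int.mod x 3 = 0 then
      fAux n (x - 5) end_ + fAux n (PySem.Int.floordiv x 3) end_
    else
      fAux n (x - 5) end_ + fAux n (x - PySem.Int.mod x 3) end_

def f (x : Int) (end_ : Int) : Int := fAux (x.toNat + 1) x end_

-- ===== PORT B =====
-- transliteration of Source B: `go` threads the memo dict through the recursion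
def goAux : Nat → Int → Int → PySem.Dict Int Int → Int × PySem.Dict Int Int
  | 0, _, _, memo => (0, memo)
  | Nat.succ n, y, end_, memo =>
    match memo.get? y with
    | some v => (v, memo)
    | none =>
      if y = end_ then (1, memo.insert y 1)
      else if y < end_ then (0, memo.insert y 0)
      else
        let nxt := if PySem.Int.mod y 3 = 0 then PySem.Int.floordiv y 3
                   else y - PySem.Int.mod y 3
        let r1 := goAux n (y - 5) end_ memo
        let r2 := goAux n nxt end_ r1.2
        (r1.1 + r2.1, r2.2.insert y (r1.1 + r2.1))

def f_alt (x : Int) (end_ : Int) : Int :=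
  (goAux (x.toNat + 1) x end_ PySem.Dict.empty).1

-- ===== PRECONDITION & SPEC =====
-- Pre_f excludes end_ < 0 with x > end_: there A's recursion cycles (RecursionError,
-- e.g. f(-1,-5) revisits -1 forever) for most such inputs, and the few that do return
-- (e.g. (-1,-2) → 0) do so only by accident of the cycle structure; B behaves the same
-- there in Python but the fuel-bounded ports are only claimed on terminating inputs.
def Pre_f (x : Int) (end_ : Int) : Prop := 0 ≤ end_ ∨ x ≤ end_
instance (x : Int) (end_ : Int) : Decidable (Pre_f x end_) := by unfold Pre_f; infer_instance
def pvWitness_f : Int × Int := (30, 0)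

def Spec_f (x : Int) (end_ : Int) (out : Int) : Prop := out = f_alt x end_
instance (x : Int) (end_ : Int) (out : Int) : Decidable (Spec_f x end_ out) := by unfold Spec_f; infer_instance

-- ===== CLAIM (what is proved, stated in full; the proofs are below) =====
def Claim_equal_f : Prop := ∀ (x : Int) (end_ : Int), Dom_f x end_ → Pre_f x end_ → Spec_f x end_ (f x end_)

-- ===== LEMMAS AND PROOFS =====

lemma toNat_fd3_lt (y : Int) (hy : 0 < y) : (PySem.Int.floordiv y 3).toNat < y.toNat := by
  rw [PySem.Int.floordiv_eq_ediv_of_pos (by norm_num)]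
  omega

lemma toNat_submod_lt (y : Int) (hy : 0 < y) :
    (y - PySem.Int.mod y 3).toNat < y.toNat ∨ PySem.Int.mod y 3 = 0 := by
  rw [PySem.Int.mod_eq_emod_of_pos (by norm_num)]
  omega

lemma fAux_succ (n : Nat) (x end_ : Int) :
    fAux (n + 1) x end_ =
      if x = end_ then 1
      else if x < end_ then 0
      else if PySem.Int.mod x 3 = 0 then
        fAux n (x - 5) end_ + fAux n (PySem.Int.floordiv x 3) end_
      else
        fAux n (x - 5) end_ + fAux n (x - PySem.Int.mod x 3) end_ := rfl

-- the value of fAux does not depend on the fuel once it exceeds x.toNat (for end_ >= 0)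
lemma fAux_stable : ∀ (n m : Nat) (x end_ : Int), 0 ≤ end_ → x.toNat < n → x.toNat < m →
    fAux n x end_ = fAux m x end_ := by
  intro n
  induction n with
  | zero => intro m x end_ _ h; omega
  | succ n ih =>
    intro m x end_ he hn hm
    obtain ⟨m', rfl⟩ : ∃ m', m = m' + 1 := ⟨m - 1, by omega⟩
    rw [fAux_succ, fAux_succ]
    by_cases h1 : x = end_
    · simp [h1]
    by_cases h2 : x < end_
    · simp [h1, h2]
    have hx : 0 < x := by omega
    have h5 : (x - 5).toNat < x.toNat := by omega
    have h3 : (PySem.Int.floordiv x 3).toNat < x.toNat := toNat_fd3_lt x hx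
    simp only [if_neg h1, if_neg h2]
    by_cases hm3 : PySem.Int.mod x 3 = 0
    · rw [if_pos hm3, if_pos hm3,
          ih m' (x - 5) end_ he (by omega) (by omega),
          ih m' (PySem.Int.floordiv x 3) end_ he (by omega) (by omega)]
    · have hsm : (x - PySem.Int.mod x 3).toNat < x.toNat :=
        (toNat_submod_lt x hx).resolve_right hm3
      rw [if_neg hm3, if_neg hm3,
          ih m' (x - 5) end_ he (by omega) (by omega),
          ih m' (x - PySem.Int.mod x 3) end_ he (by omega) (by omega)]

-- A's defining equation for f on end_ >= 0, with the two recursive branches merged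
lemma f_unfold (x end_ : Int) (he : 0 ≤ end_) :
    f x end_ = if x = end_ then 1 else if x < end_ then 0 else
      f (x - 5) end_ +
      f (if PySem.Int.mod x 3 = 0 then PySem.Int.floordiv x 3
         else x - PySem.Int.mod x 3) end_ := by
  unfold f
  rw [fAux_succ]
  by_cases h1 : x = end_
  · simp [h1]
  by_cases h2 : x < end_
  · simp [h1, h2]
  have hx : 0 < x := by omega
  have h5 : (x - 5).toNat < x.toNat := by omega
  have h3 : (PySem.Int.floordiv x 3).toNat < x.toNat := toNat_fd3_lt x hx
  simp only [if_neg h1, if_neg h2]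
  by_cases hm3 : PySem.Int.mod x 3 = 0
  · rw [if_pos hm3, if_pos hm3,
        fAux_stable x.toNat ((x - 5).toNat + 1) (x - 5) end_ he (by omega) (by omega),
        fAux_stable x.toNat ((PySem.Int.floordiv x 3).toNat + 1) (PySem.Int.floordiv x 3) end_
          he (by omega) (by omega)]
  · have hsm : (x - PySem.Int.mod x 3).toNat < x.toNat :=
      (toNat_submod_lt x hx).resolve_right hm3
    rw [if_neg hm3, if_neg hm3,
        fAux_stable x.toNat ((x - 5).toNat + 1) (x - 5) end_ he (by omega) (by omega),
        fAux_stable x.toNat ((x - PySem.Int.mod x 3).toNat + 1) (x - PySem.Int.mod x 3) end_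
          he (by omega) (by omega)]

def MemoOK (end_ : Int) (d : PySem.Dict Int Int) : Prop :=
  ∀ k v, d.get? k = some v → v = f k end_

lemma memoOK_insert (end_ : Int) (d : PySem.Dict Int Int) (y w : Int)
    (hd : MemoOK end_ d) (hw : w = f y end_) : MemoOK end_ (d.insert y w) := by
  intro k v hkv
  rw [PySem.Dict.get?_insert] at hkv
  by_cases hk : k = y
  · subst hk
    simp only [if_true, Option.some.injEq] at hkv
    exact hkv ▸ hw
  · exact hd k v (by simpa [hk] using hkv)

-- B's memoized evaluator returns A's value and keeps the memo correct
lemma goAux_ok : ∀ (n : Nat) (y end_ : Int) (d : PySem.Dict Int Int),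
    0 ≤ end_ → y.toNat < n → MemoOK end_ d →
    (goAux n y end_ d).1 = f y end_ ∧ MemoOK end_ (goAux n y end_ d).2 := by
  intro n
  induction n with
  | zero => intro y end_ d _ h; omega
  | succ n ih =>
    intro y end_ d he hn hd
    simp only [goAux]
    cases hget : d.get? y with
    | some v => exact ⟨hd y v hget, hd⟩
    | none =>
      by_cases h1 : y = end_
      · have hv : (1 : Int) = f y end_ := by rw [f_unfold y end_ he]; simp [h1]
        simpa [h1] using And.intro hv (memoOK_insert end_ d y 1 hd hv)
      by_cases h2 : y < end_
      · have hv : (0 : Int) = f y end_ := by rw [f_unfold y end_ he]; simp [h1, h2]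
        simpa [h1, h2] using And.intro hv (memoOK_insert end_ d y 0 hd hv)
      · have hx : 0 < y := by omega
        have h5 : (y - 5).toNat < n := by omega
        have hnxt : (if PySem.Int.mod y 3 = 0 then PySem.Int.floordiv y 3
                     else y - PySem.Int.mod y 3).toNat < n := by
          by_cases hm3 : PySem.Int.mod y 3 = 0
          · simp only [hm3, if_true]
            have := toNat_fd3_lt y hx; omega
          · simp only [hm3, if_false]
            have := (toNat_submod_lt y hx).resolve_right hm3; omega
        obtain ⟨ih1, ihm1⟩ := ih (y - 5) end_ d he h5 hd
        obtain ⟨ih2, ihm2⟩ := ih _ end_ (goAux n (y - 5) end_ d).2 he hnxt ihm1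
        have hv : (goAux n (y - 5) end_ d).1 +
            (goAux n (if PySem.Int.mod y 3 = 0 then PySem.Int.floordiv y 3
                      else y - PySem.Int.mod y 3) end_ (goAux n (y - 5) end_ d).2).1
            = f y end_ := by
          rw [f_unfold y end_ he, if_neg h1, if_neg h2, ih1, ih2]
        simp only [if_neg h1, if_neg h2]
        exact ⟨hv, memoOK_insert end_ _ y _ ihm2 hv⟩

-- ===== VERDICT (by name: the statement is the Claim_ definition above) =====
theorem f_spec : Claim_equal_f := by
  intro x end_ _ hpre
  unfold Spec_f
  by_cases he : 0 ≤ end_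
  · have hempty : MemoOK end_ PySem.Dict.empty := by
      intro k v h; simp [PySem.Dict.get?_empty] at h
    have h := goAux_ok (x.toNat + 1) x end_ PySem.Dict.empty he (by omega) hempty
    unfold f_alt
    exact h.1.symm
  · have hx : x ≤ end_ := hpre.resolve_left he
    by_cases h1 : x = end_
    · simp [f, f_alt, fAux, goAux, PySem.Dict.get?_empty, h1]
    · have h2 : x < end_ := by omega
      simp [f, f_alt, fAux, goAux, PySem.Dict.get?_empty, h1, h2]
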